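-- pv_equiv track=rewrite | github.com/sansv8/pytorch-retain | Data/heartFailure.py | convert_to_int_sequences
-- ===== SOURCE A (Python) =====
-- def convert_to_int_sequences(sequences, types):
--     # Firstly, create a new list of sequences
--     seqs = []
--
--     # Next, go through each pid in sequences
--     for pid in sequences:
--         # Next, create a new list for that patient
--         patient = []
--
--         # Go through each visit of the patient
--         for visit in sequences[pid]:
--             # Next, create a new list for visit
--             nextVisit = []
--
--             # Go through each code in the visit
--             for code in visit:
--                 # Check if the code is in types
--                 # If code is not in types
--                 if code not in types:
--                     # Set the value of code to be len of types
--                     types[code] = len(types)+1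
--
--                 # Convert the code to an integer and add it to the visit
--                 nextVisit.append(types[code])
--
--             # Next, add the visit to the patient
--             patient.append(nextVisit)
--
--         # Next, add each patient to seqs
--         seqs.append(patient)
--
--     # Finally, return both seqs, and types
--     return seqs, types
-- ===== SOURCE B (Python) =====
-- def convert_to_int_sequences(sequences, types):
--     # Pass 1: build the vocabulary once, over the de-duplicated code stream
--     # (dict.fromkeys keeps first-occurrence order, so ids match first appearance).
--     all_codes = dict.fromkeys(
--         code for visits in sequences.values() for visit in visits for code in visit
--     )
--     for code in all_codes:
--         if code not in types:
--             types[code] = len(types) + 1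
--     # Pass 2: pure mapping of every code through the finished vocabulary.
--     seqs = [
--         [[types[code] for code in visit] for visit in visits]
--         for visits in sequences.values()
--     ]
--     return seqs, types
-- ===== Notes on version B (the rewrite author's own statement) =====
-- stated objective: alternative
-- what changed: A interleaves vocabulary building with sequence mapping in one triple-nested loop; B first builds the vocabulary in a single pass over the de-duplicated code stream (dict.fromkeys), then produces the sequences with a pure mapping comprehension through the finished vocabulary.
import Mathlib
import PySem

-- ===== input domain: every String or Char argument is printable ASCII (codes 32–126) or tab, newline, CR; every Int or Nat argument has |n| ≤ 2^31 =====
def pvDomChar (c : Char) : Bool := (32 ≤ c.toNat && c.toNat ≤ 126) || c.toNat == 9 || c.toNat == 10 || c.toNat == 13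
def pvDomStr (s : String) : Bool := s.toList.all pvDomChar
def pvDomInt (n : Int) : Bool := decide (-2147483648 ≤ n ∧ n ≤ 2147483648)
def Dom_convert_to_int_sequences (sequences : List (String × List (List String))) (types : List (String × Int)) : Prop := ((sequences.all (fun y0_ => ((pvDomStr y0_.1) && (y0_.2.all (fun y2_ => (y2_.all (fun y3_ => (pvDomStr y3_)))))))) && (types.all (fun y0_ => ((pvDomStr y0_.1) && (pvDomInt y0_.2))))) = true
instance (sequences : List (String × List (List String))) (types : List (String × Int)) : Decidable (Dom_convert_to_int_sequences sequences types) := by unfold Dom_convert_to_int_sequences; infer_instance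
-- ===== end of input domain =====

-- B separates vocabulary construction (one pass over the de-duplicated code stream) from a pure
-- mapping pass, instead of A's interleaved build-and-map; same return value, same mutation of types.

-- ===== PORT A =====
-- inner loop 'for code in visit': check membership, maybe insert len(types)+1, append types[code]
def pvACode (acc : List Int × PySem.Dict String Int) (code : String) :
    List Int × PySem.Dict String Int :=
  let t := if acc.2.contains code then acc.2 else acc.2.insert code ((acc.2.size : Int) + 1)
  (acc.1 ++ [t.getD code 0], t)

-- middle loop 'for visit in sequences[pid]'
def pvAVisit (acc : List (List Int) × PySem.Dict String Int) (visit : List String) :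
    List (List Int) × PySem.Dict String Int :=
  let r := visit.foldl pvACode ([], acc.2)
  (acc.1 ++ [r.1], r.2)

-- outer loop 'for pid in sequences'; 'sequences[pid]' is the dict lookup (always succeeds: pid is a key)
def pvAPatient (sd : PySem.Dict String (List (List String)))
    (acc : List (List (List Int)) × PySem.Dict String Int) (p : String × List (List String)) :
    List (List (List Int)) × PySem.Dict String Int :=
  let visits := (sd.get? p.1).getD []
  let r := visits.foldl pvAVisit ([], acc.2)
  (acc.1 ++ [r.1], r.2)

def convert_to_int_sequences (sequences : List (String × List (List String))) (types : List (String × Int)) : List (List (List Int)) × (List (String × Int)) :=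
  let sd := PySem.Dict.ofList sequences
  let r := sd.items.foldl (pvAPatient sd) ([], PySem.Dict.ofList types)
  (r.1, r.2.items)

-- ===== PORT B =====
-- loop body 'if code not in types: types[code] = len(types)+1'
def pvBAdd (d : PySem.Dict String Int) (code : String) : PySem.Dict String Int :=
  if d.contains code then d else d.insert code ((d.size : Int) + 1)

def convert_to_int_sequences_alt (sequences : List (String × List (List String))) (types : List (String × Int)) : List (List (List Int)) × (List (String × Int)) :=
  let sd := PySem.Dict.ofList sequences
  -- all_codes = dict.fromkeys(code for visits in sequences.values() for visit in visits for code in visit)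
  let allCodes := PySem.List.dedup (sd.values.flatMap (fun visits => visits.flatMap (fun visit => visit)))
  let t := allCodes.foldl pvBAdd (PySem.Dict.ofList types)
  -- seqs = [[[types[code] for code in visit] for visit in visits] for visits in sequences.values()]
  (sd.values.map (fun visits => visits.map (fun visit => visit.map (fun code => t.getD code 0))), t.items)

-- ===== PRECONDITION & SPEC =====
def Spec_convert_to_int_sequences (sequences : List (String × List (List String))) (types : List (String × Int)) (out : List (List (List Int)) × (List (String × Int))) : Prop := out = convert_to_int_sequences_alt sequences types
instance (sequences : List (String × List (List String))) (types : List (String × Int)) (out : List (List (List Int)) × (List (String × Int))) : Decidable (Spec_convert_to_int_sequences sequences types out) := by unfold Spec_convert_to_int_sequences; infer_instance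

-- ===== CLAIM (what is proved, stated in full; the proofs are below) =====
def Claim_equal_convert_to_int_sequences : Prop := ∀ (sequences : List (String × List (List String))) (types : List (String × Int)), Dom_convert_to_int_sequences sequences types → Spec_convert_to_int_sequences sequences types (convert_to_int_sequences sequences types)

-- ===== LEMMAS AND PROOFS =====

-- 'ext d cs' = B's vocabulary loop over the code stream cs
def pvExt (d : PySem.Dict String Int) (cs : List String) : PySem.Dict String Int :=
  cs.foldl pvBAdd d

theorem pvBAdd_contains_mono (d : PySem.Dict String Int) (y c : String)
    (h : d.contains c = true) : (pvBAdd d y).contains c = true := by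
  unfold pvBAdd
  split
  · exact h
  · rw [PySem.Dict.contains_insert]; simp [h]

theorem pvBAdd_get?_mono (d : PySem.Dict String Int) (y c : String) (v : Int)
    (h : d.get? c = some v) : (pvBAdd d y).get? c = some v := by
  unfold pvBAdd
  split
  · exact h
  · rcases eq_or_ne c y with rfl | hne
    · rename_i hc
      rw [PySem.Dict.contains_eq_isSome_get?, h] at hc
      simp at hc
    · rw [PySem.Dict.get?_insert_of_ne _ _ hne, h]

theorem pvBAdd_isSome_self (d : PySem.Dict String Int) (c : String) :
    ((pvBAdd d c).get? c).isSome := by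
  unfold pvBAdd
  split
  · rename_i hc
    rw [PySem.Dict.contains_eq_isSome_get?] at hc
    exact hc
  · rw [PySem.Dict.get?_insert_self]; rfl

theorem pvExt_get?_mono (cs : List String) (d : PySem.Dict String Int) (c : String) (v : Int)
    (h : d.get? c = some v) : (pvExt d cs).get? c = some v := by
  induction cs generalizing d with
  | nil => exact h
  | cons y ys ih => exact ih _ (pvBAdd_get?_mono d y c v h)

theorem pvExt_isSome_of_mem (cs : List String) (d : PySem.Dict String Int) (c : String)
    (h : c ∈ cs) : ((pvExt d cs).get? c).isSome := by
  induction cs generalizing d with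
  | nil => cases h
  | cons y ys ih =>
    rcases List.mem_cons.mp h with rfl | h
    · rcases Option.isSome_iff_exists.mp (pvBAdd_isSome_self d c) with ⟨v, hv⟩
      rw [show pvExt d (c :: ys) = pvExt (pvBAdd d c) ys from rfl,
          pvExt_get?_mono ys _ c v hv]
      rfl
    · exact ih (pvBAdd d y) h

theorem pvExt_getD_stable (cs : List String) (d : PySem.Dict String Int) (c : String)
    (h : (d.get? c).isSome) : (pvExt d cs).getD c 0 = d.getD c 0 := by
  rcases Option.isSome_iff_exists.mp h with ⟨v, hv⟩
  rw [PySem.Dict.getD_eq_get?_getD, PySem.Dict.getD_eq_get?_getD, hv,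
      pvExt_get?_mono cs d c v hv]

-- stability of the final id of a code already in the stream, under further extension
theorem pvExt_getD_ext (cs more : List String) (d : PySem.Dict String Int) (c : String)
    (h : c ∈ cs) : (pvExt (pvExt d cs) more).getD c 0 = (pvExt d cs).getD c 0 :=
  pvExt_getD_stable more _ c (pvExt_isSome_of_mem cs d c h)

-- skipping already-present codes does not change the loop's result
theorem pvExt_filter_of_contains (l : List String) (d : PySem.Dict String Int) (c : String)
    (h : d.contains c = true) :
    pvExt d (l.filter (fun y => !(y == c))) = pvExt d l := by
  induction l generalizing d with
  | nil => rfl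
  | cons y ys ih =>
    by_cases hyc : y = c
    · subst hyc
      have hstep : pvBAdd d y = d := by unfold pvBAdd; rw [h]; rfl
      simp only [List.filter_cons, beq_self_eq_true, Bool.not_true,
        show pvExt d (y :: ys) = pvExt (pvBAdd d y) ys from rfl, hstep]
      exact ih d h
    · have : (y == c) = false := by simp [hyc]
      simp only [List.filter_cons, this, Bool.not_false, if_pos]
      show pvExt (pvBAdd d y) (ys.filter _) = pvExt (pvBAdd d y) ys
      exact ih _ (pvBAdd_contains_mono d y c h)

-- the loop over the de-duplicated stream equals the loop over the full stream
theorem pvExt_dedup (cs : List String) (d : PySem.Dict String Int) :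
    pvExt d (PySem.List.dedup cs) = pvExt d cs := by
  rw [PySem.List.dedup_eq_ofList]
  induction cs generalizing d with
  | nil => rfl
  | cons c cs ih =>
    rw [PySem.Set.ofList_cons]
    show pvExt (pvBAdd d c) ((PySem.Set.ofList cs).discard c) = pvExt (pvBAdd d c) cs
    have hc : (pvBAdd d c).contains c = true := by
      rw [PySem.Dict.contains_eq_isSome_get?, pvBAdd_isSome_self]
    calc pvExt (pvBAdd d c) ((PySem.Set.ofList cs).discard c)
        = pvExt (pvBAdd d c) ((PySem.Set.ofList cs).filter (fun y => !(y == c))) := rfl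
      _ = pvExt (pvBAdd d c) (PySem.Set.ofList cs) := pvExt_filter_of_contains _ _ _ hc
      _ = pvExt (pvBAdd d c) cs := ih _

-- A's inner code loop, characterised: output = map through the extended dict, state = extended dict
theorem pvACode_loop (cs : List String) (d : PySem.Dict String Int) (out : List Int) :
    cs.foldl pvACode (out, d) =
      (out ++ cs.map (fun c => (pvExt d cs).getD c 0), pvExt d cs) := by
  induction cs generalizing d out with
  | nil => simp [pvExt]
  | cons c cs ih =>
    have hstep : pvACode (out, d) c = (out ++ [(pvBAdd d c).getD c 0], pvBAdd d c) := rfl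
    rw [List.foldl_cons, hstep, ih]
    have h1 : (pvExt (pvBAdd d c) cs).getD c 0 = (pvBAdd d c).getD c 0 :=
      pvExt_getD_stable cs _ c (pvBAdd_isSome_self d c)
    have hx : pvExt d (c :: cs) = pvExt (pvBAdd d c) cs := rfl
    rw [hx, List.map_cons, h1]
    simp

-- A's visit loop, characterised over the flattened code stream
theorem pvAVisit_loop (vs : List (List String)) (d : PySem.Dict String Int)
    (out : List (List Int)) :
    vs.foldl pvAVisit (out, d) =
      (out ++ vs.map (fun v => v.map (fun c => (pvExt d vs.flatten).getD c 0)),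
       pvExt d vs.flatten) := by
  induction vs generalizing d out with
  | nil => simp [pvExt]
  | cons v vs ih =>
    have hstep : pvAVisit (out, d) v =
        (out ++ [v.map (fun c => (pvExt d v).getD c 0)], pvExt d v) := by
      show (out ++ [(v.foldl pvACode ([], d)).1], (v.foldl pvACode ([], d)).2) = _
      rw [pvACode_loop v d []]
      rfl
    rw [List.foldl_cons, hstep, ih]
    have hflat : pvExt d (v :: vs).flatten = pvExt (pvExt d v) vs.flatten := by
      simp [pvExt, List.flatten_cons, List.foldl_append]
    have hhead : v.map (fun c => (pvExt (pvExt d v) vs.flatten).getD c 0)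
        = v.map (fun c => (pvExt d v).getD c 0) :=
      List.map_congr_left (fun c hc => pvExt_getD_ext v vs.flatten d c hc)
    rw [List.map_cons, hflat, hhead]
    simp

-- the total code stream of a patient list
def pvCodes (ps : List (String × List (List String))) : List String :=
  ps.flatMap (fun p => p.2.flatten)

-- A's patient loop, characterised; h: the dict lookup returns each entry's own value
theorem pvAPatient_loop (ps : List (String × List (List String)))
    (sd : PySem.Dict String (List (List String))) (d : PySem.Dict String Int)
    (out : List (List (List Int)))
    (h : ∀ p ∈ ps, sd.get? p.1 = some p.2) :
    ps.foldl (pvAPatient sd) (out, d) =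
      (out ++ ps.map (fun p => p.2.map (fun v => v.map (fun c => (pvExt d (pvCodes ps)).getD c 0))),
       pvExt d (pvCodes ps)) := by
  induction ps generalizing d out with
  | nil => simp [pvExt, pvCodes]
  | cons p ps ih =>
    have hp : sd.get? p.1 = some p.2 := h p (List.mem_cons_self)
    have hstep : pvAPatient sd (out, d) p =
        (out ++ [p.2.map (fun v => v.map (fun c => (pvExt d p.2.flatten).getD c 0))],
         pvExt d p.2.flatten) := by
      show (out ++ [(((sd.get? p.1).getD []).foldl pvAVisit ([], d)).1],
            (((sd.get? p.1).getD []).foldl pvAVisit ([], d)).2) = _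
      rw [hp]
      show (out ++ [(p.2.foldl pvAVisit ([], d)).1], (p.2.foldl pvAVisit ([], d)).2) = _
      rw [pvAVisit_loop p.2 d []]
      rfl
    rw [List.foldl_cons, hstep, ih _ _ (fun q hq => h q (List.mem_cons_of_mem p hq))]
    have hflat : pvExt d (pvCodes (p :: ps)) = pvExt (pvExt d p.2.flatten) (pvCodes ps) := by
      simp [pvExt, pvCodes, List.flatMap_cons, List.foldl_append]
    have hhead : p.2.map (fun v => v.map (fun c => (pvExt (pvExt d p.2.flatten) (pvCodes ps)).getD c 0))
        = p.2.map (fun v => v.map (fun c => (pvExt d p.2.flatten).getD c 0)) := by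
      refine List.map_congr_left (fun v hv => List.map_congr_left (fun c hc => ?_))
      exact pvExt_getD_ext p.2.flatten (pvCodes ps) d c (List.mem_flatten.mpr ⟨v, hv, hc⟩)
    rw [List.map_cons, hflat, hhead]
    simp

-- B's code stream (over values) is A's code stream (over items)
theorem pvStreams_eq (sd : PySem.Dict String (List (List String))) :
    sd.values.flatMap (fun visits => visits.flatMap (fun visit => visit)) = pvCodes sd.items := by
  show (sd.items.map (·.2)).flatMap _ = _
  rw [List.flatMap_map]
  unfold pvCodes
  simp [List.flatMap_id']

-- ===== VERDICT (by name: the statement is the Claim_ definition above) =====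
theorem convert_to_int_sequences_spec : Claim_equal_convert_to_int_sequences := by
  intro sequences types _
  unfold Spec_convert_to_int_sequences convert_to_int_sequences convert_to_int_sequences_alt
  dsimp only
  set sd := PySem.Dict.ofList sequences with hsd
  have hlook : ∀ p ∈ sd.items, sd.get? p.1 = some p.2 := by
    intro p hp
    obtain ⟨k, v⟩ := p
    exact PySem.Dict.get?_of_mem_items sd hp (PySem.Dict.nodup_keys_ofList sequences)
  rw [pvAPatient_loop sd.items sd (PySem.Dict.ofList types) [] hlook]
  rw [show (PySem.List.dedup (sd.values.flatMap (fun visits => visits.flatMap (fun visit => visit)))).foldl pvBAdd (PySem.Dict.ofList types)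
      = pvExt (PySem.Dict.ofList types) (PySem.List.dedup (sd.values.flatMap (fun visits => visits.flatMap (fun visit => visit)))) from rfl,
      pvExt_dedup, pvStreams_eq]
  show (sd.items.map _, _) = ((sd.items.map (·.2)).map _, _)
  rw [List.map_map]
  rfl
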